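-- pv_equiv track=rewrite | github.com/AtharvaGanorkar/Dsa-Python-Repo | 05_Hashing/09_Print Non-Repeated Elements.py | printNonRepeated
-- ===== SOURCE A (Python) =====
-- def printNonRepeated(arr,n):
--
--         frequency = {}
--
--         for num in arr:
--             if num in frequency:
--                 frequency[num]  +=1
--             else:
--                 frequency[num]  = 1
--
--         list2 = []
--         for key in arr:
--             if frequency[key] == 1:
--                 list2.append(key)
--         return list2
-- ===== SOURCE B (Python) =====
-- def printNonRepeated(arr, n):
--     # single pass: build-and-retract an insertion-ordered dict of candidates
--     seen = set()
--     result = {}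
--     for num in arr:
--         if num in seen:
--             result.pop(num, None)
--         else:
--             seen.add(num)
--             result[num] = None
--     return list(result)
-- ===== Notes on version B (the rewrite author's own statement) =====
-- stated objective: alternative
-- what changed: Replaces the two-pass count-then-filter with a single pass that inserts each first-seen value into an insertion-ordered dict and retracts it on a repeat, returning the dict's keys.
import Mathlib
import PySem

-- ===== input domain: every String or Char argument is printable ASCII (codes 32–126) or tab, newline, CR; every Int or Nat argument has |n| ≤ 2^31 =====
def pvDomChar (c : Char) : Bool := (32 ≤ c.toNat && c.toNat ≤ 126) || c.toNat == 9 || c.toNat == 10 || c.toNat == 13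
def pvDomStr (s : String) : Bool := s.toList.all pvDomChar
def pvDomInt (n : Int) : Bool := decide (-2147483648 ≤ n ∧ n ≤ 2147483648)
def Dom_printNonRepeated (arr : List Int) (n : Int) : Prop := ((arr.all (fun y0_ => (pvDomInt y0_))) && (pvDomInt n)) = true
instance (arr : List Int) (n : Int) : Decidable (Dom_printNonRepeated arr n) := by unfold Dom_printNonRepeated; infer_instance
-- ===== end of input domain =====

-- B replaces A's two-pass count-then-filter with a single build-and-retract pass over an insertion-ordered dict (same complexity, different decomposition).


-- ===== PORT A =====
-- frequency[key] in the second loop is ported as getD key 0: every key looked up there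
-- was inserted by the first loop, so the default is never taken (no KeyError; A is total).
def printNonRepeated (arr : List Int) (n : Int) : List Int :=
  let frequency : PySem.Dict Int Int :=
    arr.foldl (fun d num =>
      if d.contains num then d.insert num (d.getD num 0 + 1)
      else d.insert num 1) PySem.Dict.empty
  arr.foldl (fun list2 key => if frequency.getD key 0 == 1 then list2 ++ [key] else list2) []

-- ===== PORT B =====
-- one pass: 'seen' set plus 'result' insertion-ordered dict (value () = None);
-- result.pop(num, None) is Dict.erase; list(result) is Dict.keys.
def printNonRepeated_alt (arr : List Int) (n : Int) : List Int :=
  (arr.foldl (fun (st : PySem.Set Int × PySem.Dict Int Unit) num =>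
      if PySem.Set.contains st.1 num then (st.1, st.2.erase num)
      else (PySem.Set.add st.1 num, st.2.insert num ()))
    (PySem.Set.empty, PySem.Dict.empty)).2.keys

-- ===== PRECONDITION & SPEC =====
def Spec_printNonRepeated (arr : List Int) (n : Int) (out : List Int) : Prop := out = printNonRepeated_alt arr n
instance (arr : List Int) (n : Int) (out : List Int) : Decidable (Spec_printNonRepeated arr n out) := by unfold Spec_printNonRepeated; infer_instance

-- ===== CLAIM (what is proved, stated in full; the proofs are below) =====
def Claim_equal_printNonRepeated : Prop := ∀ (arr : List Int) (n : Int), Dom_printNonRepeated arr n → Spec_printNonRepeated arr n (printNonRepeated arr n)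

-- ===== LEMMAS AND PROOFS =====

-- the shared characterisation both ports are reduced to: elements of l occurring exactly once, in order
def pvOnce (l : List Int) : List Int := l.filter (fun x => ((l.count x : Int) == 1))

-- A's first loop is Counter(arr)
lemma pvA_freq (arr : List Int) :
    arr.foldl (fun (d : PySem.Dict Int Int) num =>
      if d.contains num then d.insert num (d.getD num 0 + 1)
      else d.insert num 1) PySem.Dict.empty = PySem.Dict.counter arr := by
  rw [← PySem.Dict.foldl_insert_getD_add_one_eq_counter]
  congr 1
  funext d num
  by_cases h : d.contains num
  · simp [h]
  · simp only [h, if_false, Bool.false_eq_true]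
    rw [PySem.Dict.getD_of_not_contains (h := by simpa using h)]
    norm_num

lemma pvA_eq (arr : List Int) (n : Int) : printNonRepeated arr n = pvOnce arr := by
  simp only [printNonRepeated, pvA_freq, PySem.Dict.getD_counter]
  rw [PySem.List.foldl_append_if (f := fun x => x)]
  simp [pvOnce, List.count]

-- how pvOnce grows when the scanned prefix is extended by one element
lemma pvOnce_append (pref : List Int) (num : Int) :
    pvOnce (pref ++ [num]) =
      if num ∈ pref then (pvOnce pref).filter (fun x => x != num)
      else pvOnce pref ++ [num] := by
  unfold pvOnce
  rw [List.filter_append]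
  by_cases h : num ∈ pref
  · simp only [h, if_true]
    rw [List.filter_filter]
    have h1 : List.filter (fun x => ((List.count x (pref ++ [num]) : Int) == 1)) [num] = [] := by
      have : 1 ≤ pref.count num := List.one_le_count_iff.mpr h
      simp [List.count_append]
      omega
    rw [h1, List.append_nil]
    apply List.filter_congr
    intro x hx
    by_cases hxn : x = num
    · subst hxn
      have : 1 ≤ pref.count x := List.one_le_count_iff.mpr h
      simp [List.count_append]
      omega
    · simp [List.count_append, hxn, Ne.symm hxn]
  · simp only [h, if_false]
    have h1 : List.filter (fun x => ((List.count x (pref ++ [num]) : Int) == 1)) [num] = [num] := by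
      have : pref.count num = 0 := List.count_eq_zero.mpr h
      simp [List.count_append, this]
    rw [h1]
    congr 1
    apply List.filter_congr
    intro x hx
    have hxn : x ≠ num := fun e => h (e ▸ hx)
    simp [List.count_append, Ne.symm hxn]

lemma pvOfList_append_singleton (l : List Int) (x : Int) :
    PySem.Set.ofList (l ++ [x]) = PySem.Set.add (PySem.Set.ofList l) x := by
  simp [PySem.Set.ofList_eq_foldl, List.foldl_append]

-- B's loop invariant: after scanning pref, seen = set(pref) and result's keys = pvOnce pref
lemma pvB_inv (pref : List Int) :
    pref.foldl (fun (st : PySem.Set Int × PySem.Dict Int Unit) num =>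
      if PySem.Set.contains st.1 num then (st.1, st.2.erase num)
      else (PySem.Set.add st.1 num, st.2.insert num ()))
      (PySem.Set.empty, PySem.Dict.empty)
    = (PySem.Set.ofList pref, PySem.Dict.mk ((pvOnce pref).map (fun x => (x, ())))) := by
  induction pref using List.reverseRecOn with
  | nil => rfl
  | append_singleton pref num ih =>
    rw [List.foldl_append, ih, pvOnce_append, pvOfList_append_singleton]
    simp only [List.foldl_cons, List.foldl_nil]
    by_cases h : num ∈ pref
    · have hc : PySem.Set.contains (PySem.Set.ofList pref) num = true := by
        simp [PySem.Set.contains, PySem.Set.mem_ofList, h]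
      rw [if_pos hc, if_pos h]
      refine Prod.ext ?_ ?_
      · simp [PySem.Set.add, PySem.Set.mem_ofList, h]
      · simp only [PySem.Dict.erase, List.filter_map]
        congr 1
    · rw [if_neg (by simp [PySem.Set.contains, PySem.Set.mem_ofList, h]), if_neg h]
      refine Prod.ext ?_ ?_
      · rfl
      · have hnc : (PySem.Dict.mk ((pvOnce pref).map (fun x => (x, ())))).contains num = false := by
          simp [PySem.Dict.contains_mk]
          intro a ha
          exact fun e => h (e ▸ List.mem_of_mem_filter ha)
        apply PySem.Dict.ext
        rw [PySem.Dict.items_insert_of_not_contains (h := hnc)]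
        simp

lemma pvB_eq (arr : List Int) (n : Int) : printNonRepeated_alt arr n = pvOnce arr := by
  unfold printNonRepeated_alt
  rw [pvB_inv]
  simp only [PySem.Dict.keys, List.map_map]
  exact List.map_id _

-- ===== VERDICT (by name: the statement is the Claim_ definition above) =====
theorem printNonRepeated_spec : Claim_equal_printNonRepeated := by
  intro arr n _
  unfold Spec_printNonRepeated
  rw [pvA_eq, pvB_eq]
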